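-- pv_equiv track=rewrite | github.com/ksugahar/circuit-converter | src/asc_parser.py | _make_offsets
-- ===== SOURCE A (Python) =====
-- def _make_offsets(pins):
--     """R0のピン座標タプルから全8回転のオフセット辞書を生成"""
--     tf = {
--         'R0':   lambda x, y: (x, y),
--         'R90':  lambda x, y: (-y, x),
--         'R180': lambda x, y: (-x, -y),
--         'R270': lambda x, y: (y, -x),
--         'M0':   lambda x, y: (-x, y),
--         'M90':  lambda x, y: (y, x),
--         'M180': lambda x, y: (x, -y),
--         'M270': lambda x, y: (-y, -x),
--     }
--     return {rot: tuple(f(px, py) for px, py in pins)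
--             for rot, f in tf.items()}
-- ===== SOURCE B (Python) =====
-- def _make_offsets(pins):
--     """R0のピン座標タプルから全8回転のオフセット辞書を生成"""
--     def rot(ps):
--         # one 90-degree rotation applied to a whole coordinate list
--         return [(-y, x) for x, y in ps]
--     r0 = [(x, y) for x, y in pins]
--     r90 = rot(r0)
--     r180 = rot(r90)
--     r270 = rot(r180)
--     m0 = [(-x, y) for x, y in pins]
--     m270 = rot(m0)
--     m180 = rot(m270)
--     m90 = rot(m180)
--     return {
--         'R0': tuple(r0), 'R90': tuple(r90), 'R180': tuple(r180), 'R270': tuple(r270),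
--         'M0': tuple(m0), 'M90': tuple(m90), 'M180': tuple(m180), 'M270': tuple(m270),
--     }
-- ===== Notes on version B (the rewrite author's own statement) =====
-- stated objective: alternative
-- what changed: Replaces the eight independent closed-form lambdas with iterated application of a single 90-degree rotation: the four rotations are generated from the identity and the four mirrors from one reflection by repeated rotation (cycle M0, M270, M180, M90), then assembled into the same 8-key dict.
import Mathlib
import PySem

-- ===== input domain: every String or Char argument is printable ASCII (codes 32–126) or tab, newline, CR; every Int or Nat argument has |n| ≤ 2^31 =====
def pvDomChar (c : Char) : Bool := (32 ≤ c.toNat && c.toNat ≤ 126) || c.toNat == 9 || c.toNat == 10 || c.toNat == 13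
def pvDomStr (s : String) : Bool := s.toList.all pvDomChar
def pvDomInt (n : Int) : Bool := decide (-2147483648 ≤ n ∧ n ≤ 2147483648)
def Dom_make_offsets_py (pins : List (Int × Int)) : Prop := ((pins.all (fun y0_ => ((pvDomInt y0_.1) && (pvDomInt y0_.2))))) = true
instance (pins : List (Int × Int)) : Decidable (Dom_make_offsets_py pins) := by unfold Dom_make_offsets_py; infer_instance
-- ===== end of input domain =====

-- B generates the 8 transforms by iterating one 90-degree rotation instead of A's eight closed-form lambdas (alternative decomposition, same cost).

-- ===== PORT A =====
-- dict comprehension over tf.items() in insertion order; each value maps its lambda over pins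
def make_offsets_py (pins : List (Int × Int)) : List (String × List (Int × Int)) :=
  [ ("R0",   pins.map (fun p => (p.1, p.2))),
    ("R90",  pins.map (fun p => (-p.2, p.1))),
    ("R180", pins.map (fun p => (-p.1, -p.2))),
    ("R270", pins.map (fun p => (p.2, -p.1))),
    ("M0",   pins.map (fun p => (-p.1, p.2))),
    ("M90",  pins.map (fun p => (p.2, p.1))),
    ("M180", pins.map (fun p => (p.1, -p.2))),
    ("M270", pins.map (fun p => (-p.2, -p.1))) ]

-- ===== PORT B =====
-- rot applies one 90-degree rotation to a whole coordinate list
def pvRotB (ps : List (Int × Int)) : List (Int × Int) := ps.map (fun p => (-p.2, p.1))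

def make_offsets_py_alt (pins : List (Int × Int)) : List (String × List (Int × Int)) :=
  let r0 := pins.map (fun p => (p.1, p.2))
  let r90 := pvRotB r0
  let r180 := pvRotB r90
  let r270 := pvRotB r180
  let m0 := pins.map (fun p => (-p.1, p.2))
  let m270 := pvRotB m0
  let m180 := pvRotB m270
  let m90 := pvRotB m180
  [ ("R0", r0), ("R90", r90), ("R180", r180), ("R270", r270),
    ("M0", m0), ("M90", m90), ("M180", m180), ("M270", m270) ]

-- ===== PRECONDITION & SPEC =====
def Spec_make_offsets_py (pins : List (Int × Int)) (out : List (String × List (Int × Int))) : Prop := out = make_offsets_py_alt pins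
instance (pins : List (Int × Int)) (out : List (String × List (Int × Int))) : Decidable (Spec_make_offsets_py pins out) := by unfold Spec_make_offsets_py; infer_instance

-- ===== CLAIM (what is proved, stated in full; the proofs are below) =====
def Claim_equal_make_offsets_py : Prop := ∀ (pins : List (Int × Int)), Dom_make_offsets_py pins → Spec_make_offsets_py pins (make_offsets_py pins)

-- ===== LEMMAS AND PROOFS =====

-- ===== VERDICT (by name: the statement is the Claim_ definition above) =====
theorem make_offsets_py_spec : Claim_equal_make_offsets_py := by
  intro pins _
  simp [Spec_make_offsets_py, make_offsets_py, make_offsets_py_alt, pvRotB,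
    List.map_map, List.map_inj_left, Function.comp, Prod.ext_iff]
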